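-- pv_equiv track=rewrite | github.com/codeitfast/2025-linear-algebra-final-project | problem-11.py | count_invertible_matrices
-- ===== SOURCE A (Python) =====
-- import math
--
-- def count_invertible_matrices(modulus=27):
--     total = modulus ** 4
--     count_inv = 0
--     for a in range(modulus):
--         for b in range(modulus):
--             for c in range(modulus):
--                 for d in range(modulus):
--                     det = (a * d - b * c) % modulus
--                     # A matrix is invertible if its determinant is a unit in Z27,
--                     # i.e. gcd(det, 27) == 1.
--                     if math.gcd(det, modulus) == 1:
--                         count_inv += 1
--     return count_inv, total
-- ===== SOURCE B (Python) =====
-- import math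
--
-- def count_invertible_matrices(modulus=27):
--     total = modulus ** 4
--     # count how often each product value (x * y) % modulus occurs among pairs of residues
--     prod_count = {}
--     for a in range(modulus):
--         for d in range(modulus):
--             v = (a * d) % modulus
--             prod_count[v] = prod_count.get(v, 0) + 1
--     # det = (ad - bc) % modulus; combine the two independent product tables
--     count_inv = 0
--     for v1 in range(modulus):
--         for v2 in range(modulus):
--             if math.gcd((v1 - v2) % modulus, modulus) == 1:
--                 count_inv += prod_count.get(v1, 0) * prod_count.get(v2, 0)
--     return count_inv, total
-- ===== Notes on version B (the rewrite author's own statement) =====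
-- stated objective: faster
-- what changed: Instead of enumerating all n^4 matrices, B builds a counter of product values (a*d)%n over residue pairs once, then combines the two identical product tables over all (v1,v2) value pairs whose difference is a unit mod n, turning the quadruple loop into two double loops.
import Mathlib
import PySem

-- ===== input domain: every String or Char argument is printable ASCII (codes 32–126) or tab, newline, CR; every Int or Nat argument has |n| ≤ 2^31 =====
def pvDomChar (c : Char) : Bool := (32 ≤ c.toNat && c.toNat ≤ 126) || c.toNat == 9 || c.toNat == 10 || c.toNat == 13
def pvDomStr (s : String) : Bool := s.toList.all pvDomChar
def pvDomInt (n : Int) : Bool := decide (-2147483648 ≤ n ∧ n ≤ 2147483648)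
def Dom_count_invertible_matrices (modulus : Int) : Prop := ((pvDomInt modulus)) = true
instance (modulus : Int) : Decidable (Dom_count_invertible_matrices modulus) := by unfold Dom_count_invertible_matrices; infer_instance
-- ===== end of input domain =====

-- B replaces A's O(n^4) enumeration of all matrices by one table of product-value
-- counts combined over pairs of values (O(n^2)); the tuple result is returned as a 2-element list.

-- ===== PORT A =====
-- math.gcd(x, y) equals Int.gcd x y (both take absolute values); Python's '%' is PySem.Int.mod.
def count_invertible_matrices (modulus : Int) : List Int :=
  let total := modulus ^ 4
  let count_inv : Int :=
    (PySem.List.pyRange 0 modulus 1).foldl (fun acc a =>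
      (PySem.List.pyRange 0 modulus 1).foldl (fun acc b =>
        (PySem.List.pyRange 0 modulus 1).foldl (fun acc c =>
          (PySem.List.pyRange 0 modulus 1).foldl (fun acc d =>
            let det := PySem.Int.mod (a * d - b * c) modulus
            if Int.gcd det modulus = 1 then acc + 1 else acc) acc) acc) acc) 0
  [count_inv, total]

-- ===== PORT B =====
def count_invertible_matrices_alt (modulus : Int) : List Int :=
  let total := modulus ^ 4
  let prodCount : PySem.Dict Int Int :=
    (PySem.List.pyRange 0 modulus 1).foldl (fun pc a =>
      (PySem.List.pyRange 0 modulus 1).foldl (fun pc d =>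
        pc.modify (PySem.Int.mod (a * d) modulus) 0 (· + 1)) pc) PySem.Dict.empty
  let count_inv : Int :=
    (PySem.List.pyRange 0 modulus 1).foldl (fun acc v1 =>
      (PySem.List.pyRange 0 modulus 1).foldl (fun acc v2 =>
        if Int.gcd (PySem.Int.mod (v1 - v2) modulus) modulus = 1 then
          acc + prodCount.getD v1 0 * prodCount.getD v2 0
        else acc) acc) 0
  [count_inv, total]

-- ===== PRECONDITION & SPEC =====
def Spec_count_invertible_matrices (modulus : Int) (out : List Int) : Prop := out = count_invertible_matrices_alt modulus
instance (modulus : Int) (out : List Int) : Decidable (Spec_count_invertible_matrices modulus out) := by unfold Spec_count_invertible_matrices; infer_instance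

-- ===== CLAIM (what is proved, stated in full; the proofs are below) =====
def Claim_equal_count_invertible_matrices : Prop := ∀ (modulus : Int), Dom_count_invertible_matrices modulus → Spec_count_invertible_matrices modulus (count_invertible_matrices modulus)

-- ===== LEMMAS AND PROOFS =====

theorem pv_ite_add_shape (P : Prop) [Decidable P] (acc t : Int) :
    (if P then acc + t else acc) = acc + (if P then t else 0) := by
  split <;> simp
theorem pv_count_flatMap {α β : Type} [BEq β] (xs : List α) (m : α → List β) (v : β) :
    ((xs.flatMap m).count v : Int) = (xs.map (fun a => ((m a).count v : Int))).sum := by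
  induction xs with
  | nil => simp
  | cons x xs ih => simp [List.flatMap_cons, List.count_append, ih]
theorem pv_list_sum_range (N : Nat) (f : Nat → Int) :
    ((List.range N).map f).sum = ∑ i ∈ Finset.range N, f i := by
  induction N with
  | zero => simp
  | succ k ih => rw [List.range_succ, Finset.sum_range_succ, List.map_append]; simp [ih]
theorem pv_cnt_eq (n : Int) (v : Int) :
    ((PySem.List.pyRange 0 n 1).foldl (fun pc a =>
      (PySem.List.pyRange 0 n 1).foldl (fun pc d =>
        pc.modify (PySem.Int.mod (a * d) n) 0 (· + 1)) pc) PySem.Dict.empty).getD v 0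
      = ∑ i ∈ Finset.range n.toNat, ∑ j ∈ Finset.range n.toNat,
          (if PySem.Int.mod ((i : Int) * (j : Int)) n = v then (1 : Int) else 0) := by
  have h1 : ∀ (pc : PySem.Dict Int Int) (a : Int),
      (PySem.List.pyRange 0 n 1).foldl (fun pc d => pc.modify (PySem.Int.mod (a * d) n) 0 (· + 1)) pc
        = ((PySem.List.pyRange 0 n 1).map (fun d => PySem.Int.mod (a * d) n)).foldl
            (fun pc x => pc.modify x 0 (· + 1)) pc := by
    intro pc a; rw [List.foldl_map]
  simp only [h1]
  rw [← List.foldl_flatMap]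
  rw [PySem.Dict.getD_foldl_modify_add_one]
  rw [pv_count_flatMap]
  simp only [List.count_eq_countP, List.countP_map]
  have h2 : ∀ (l : List Int) (p : Int → Bool), ((l.countP p : Nat) : Int) = (l.map (fun x => if p x then (1:Int) else 0)).sum := fun l p => (PySem.List.sum_map_ite_one_zero p l).symm
  simp only [Function.comp_def, h2]
  rw [PySem.List.pyRange_one]
  simp only [List.map_map, Function.comp_def]
  simp [pv_list_sum_range]
theorem pv_fiber_sum (N : Nat) (s : Finset (Nat × Nat)) (F : Nat × Nat → Int) (g : Int → Int)
    (hF : ∀ x ∈ s, 0 ≤ F x ∧ F x < (N : Int)) :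
    ∑ v ∈ Finset.range N, (∑ x ∈ s, if F x = (v : Int) then (1 : Int) else 0) * g (v : Int)
      = ∑ x ∈ s, g (F x) := by
  simp only [Finset.sum_mul, ite_mul, one_mul, zero_mul]
  rw [Finset.sum_comm]
  apply Finset.sum_congr rfl
  intro x hx
  obtain ⟨h0, hlt⟩ := hF x hx
  have hkey : ∀ v : Nat, (F x = (v : Int)) ↔ (v = (F x).toNat) := by intro v; omega
  calc ∑ v ∈ Finset.range N, (if F x = (v : Int) then g (v : Int) else 0)
      = ∑ v ∈ Finset.range N, (if v = (F x).toNat then g (v : Int) else 0) := by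
        apply Finset.sum_congr rfl; intro v _; simp [hkey v]
    _ = g (F x) := by
        rw [Finset.sum_ite_eq' (Finset.range N) ((F x).toNat) (fun v => g (v : Int))]
        have hm : (F x).toNat ∈ Finset.range N := by simp; omega
        simp [hm, Int.toNat_of_nonneg h0]

theorem pv_core (n : Int) (hn : 0 < n) :
    (∑ a ∈ Finset.range n.toNat, ∑ b ∈ Finset.range n.toNat, ∑ c ∈ Finset.range n.toNat,
      ∑ d ∈ Finset.range n.toNat,
        (if Int.gcd (PySem.Int.mod ((a : Int) * (d : Int) - (b : Int) * (c : Int)) n) n = 1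
          then (1 : Int) else 0))
    = ∑ v1 ∈ Finset.range n.toNat, ∑ v2 ∈ Finset.range n.toNat,
        (if Int.gcd (PySem.Int.mod ((v1 : Int) - (v2 : Int)) n) n = 1
          then (∑ i ∈ Finset.range n.toNat, ∑ j ∈ Finset.range n.toNat,
                  (if PySem.Int.mod ((i : Int) * (j : Int)) n = (v1 : Int) then (1 : Int) else 0))
              * (∑ i ∈ Finset.range n.toNat, ∑ j ∈ Finset.range n.toNat,
                  (if PySem.Int.mod ((i : Int) * (j : Int)) n = (v2 : Int) then (1 : Int) else 0))
          else 0) := by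
  set N := n.toNat with hN
  have hNn : ((N : Int)) = n := Int.toNat_of_nonneg hn.le
  set F : Nat × Nat → Int := fun x => PySem.Int.mod ((x.1 : Int) * (x.2 : Int)) n with hF
  set G : Int → Int → Int := fun u w => if Int.gcd (PySem.Int.mod (u - w) n) n = 1 then 1 else 0 with hG
  set s : Finset (Nat × Nat) := Finset.range N ×ˢ Finset.range N with hs
  have hFbound : ∀ x ∈ s, 0 ≤ F x ∧ F x < (N : Int) := by
    intro x _
    rw [hNn]
    exact ⟨PySem.Int.mod_nonneg _ hn, PySem.Int.mod_lt _ hn⟩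
  have hcnt : ∀ v : Int, (∑ i ∈ Finset.range N, ∑ j ∈ Finset.range N,
      (if PySem.Int.mod ((i : Int) * (j : Int)) n = v then (1 : Int) else 0))
      = ∑ x ∈ s, (if F x = v then (1 : Int) else 0) := by
    intro v; rw [hs, Finset.sum_product]
  -- RHS to double sum over s
  have hsplit : ∀ (P : Prop) [Decidable P] (x y : Int),
      (if P then x * y else 0) = x * (y * (if P then (1:Int) else 0)) := by
    intro P _ x y; split <;> ring
  calc ∑ a ∈ Finset.range N, ∑ b ∈ Finset.range N, ∑ c ∈ Finset.range N, ∑ d ∈ Finset.range N,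
        (if Int.gcd (PySem.Int.mod ((a : Int) * (d : Int) - (b : Int) * (c : Int)) n) n = 1
          then (1 : Int) else 0)
      = ∑ a ∈ Finset.range N, ∑ d ∈ Finset.range N, ∑ b ∈ Finset.range N, ∑ c ∈ Finset.range N,
          G (F (a, d)) (F (b, c)) := by
        apply Finset.sum_congr rfl; intro a _
        calc (∑ b ∈ Finset.range N, ∑ c ∈ Finset.range N, ∑ d ∈ Finset.range N,
              (if Int.gcd (PySem.Int.mod ((a : Int) * (d : Int) - (b : Int) * (c : Int)) n) n = 1
                then (1 : Int) else 0))
            = ∑ b ∈ Finset.range N, ∑ d ∈ Finset.range N, ∑ c ∈ Finset.range N,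
              (if Int.gcd (PySem.Int.mod ((a : Int) * (d : Int) - (b : Int) * (c : Int)) n) n = 1
                then (1 : Int) else 0) :=
              Finset.sum_congr rfl (fun b _ => Finset.sum_comm)
          _ = ∑ d ∈ Finset.range N, ∑ b ∈ Finset.range N, ∑ c ∈ Finset.range N,
              (if Int.gcd (PySem.Int.mod ((a : Int) * (d : Int) - (b : Int) * (c : Int)) n) n = 1
                then (1 : Int) else 0) := Finset.sum_comm
          _ = ∑ d ∈ Finset.range N, ∑ b ∈ Finset.range N, ∑ c ∈ Finset.range N,
              G (F (a, d)) (F (b, c)) := by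
              apply Finset.sum_congr rfl; intro d _
              apply Finset.sum_congr rfl; intro b _
              apply Finset.sum_congr rfl; intro c _
              rw [hG, hF]
              have hmod : PySem.Int.mod ((a : Int) * (d : Int) - (b : Int) * (c : Int)) n
                  = PySem.Int.mod (PySem.Int.mod ((a : Int) * (d : Int)) n
                      - PySem.Int.mod ((b : Int) * (c : Int)) n) n := by
                simp only [PySem.Int.mod_eq_emod_of_pos hn]; rw [Int.sub_emod]
              rw [hmod]
    _ = ∑ y ∈ s, ∑ x ∈ s, G (F y) (F x) := by
        rw [hs, Finset.sum_product]
        apply Finset.sum_congr rfl; intro a _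
        apply Finset.sum_congr rfl; intro d _
        rw [Finset.sum_product]
    _ = ∑ v1 ∈ Finset.range N, (∑ y ∈ s, if F y = (v1 : Int) then (1:Int) else 0)
          * (∑ x ∈ s, G (v1 : Int) (F x)) := by
        rw [pv_fiber_sum N s F (fun u => ∑ x ∈ s, G u (F x)) hFbound]
    _ = ∑ v1 ∈ Finset.range N, (∑ y ∈ s, if F y = (v1 : Int) then (1:Int) else 0)
          * (∑ v2 ∈ Finset.range N, (∑ x ∈ s, if F x = (v2 : Int) then (1:Int) else 0)
              * G (v1 : Int) (v2 : Int)) := by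
        apply Finset.sum_congr rfl; intro v1 _
        rw [pv_fiber_sum N s F (fun w => G (v1 : Int) w) hFbound]
    _ = _ := by
        apply Finset.sum_congr rfl; intro v1 _
        rw [Finset.mul_sum]
        apply Finset.sum_congr rfl; intro v2 _
        rw [hcnt (v1 : Int), hcnt (v2 : Int), hsplit]
theorem pv_main (m : Int) : count_invertible_matrices m = count_invertible_matrices_alt m := by
  by_cases hm : 0 < m
  · simp only [count_invertible_matrices, count_invertible_matrices_alt]
    congr 1
    simp only [pv_cnt_eq m]
    simp only [pv_ite_add_shape]
    simp only [PySem.List.foldl_add]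
    rw [PySem.List.pyRange_one]
    simp only [List.map_map, Function.comp_def, pv_list_sum_range]
    simp only [zero_add, sub_zero]
    exact pv_core m hm
  · have hm' : m ≤ 0 := by omega
    simp [count_invertible_matrices, count_invertible_matrices_alt,
      PySem.List.pyRange_one_eq_nil hm']

-- ===== VERDICT (by name: the statement is the Claim_ definition above) =====
theorem count_invertible_matrices_spec : Claim_equal_count_invertible_matrices := by
  intro modulus _
  exact pv_main modulus
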